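-- pv_equiv track=rewrite | github.com/R21Digital/Project-MorningStar | modules/combat_profile/profession_analyzer.py | _determine_combat_distance
-- ===== SOURCE A (Python) =====
-- from typing import Dict, List, Optional, Any, Tuple
-- from enum import Enum
--
-- class CombatRole(Enum):
--     """Combat role enumeration."""
--     DPS = "dps"
--     HEALER = "healer"
--     TANK = "tank"
--     SUPPORT = "support"
--     HYBRID = "hybrid"
--
-- def _determine_combat_distance(weapon_preferences: List[str], primary_role: CombatRole) -> str:
--     """Determine preferred combat distance."""
--     if not weapon_preferences:
--         return "medium"
--
--     # Analyze weapon preferences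
--     melee_weapons = ["unarmed", "melee", "lightsaber"]
--     ranged_weapons = ["rifle", "carbine", "pistol", "heavy_weapon"]
--
--     melee_count = sum(1 for weapon in weapon_preferences if weapon in melee_weapons)
--     ranged_count = sum(1 for weapon in weapon_preferences if weapon in ranged_weapons)
--
--     if melee_count > ranged_count:
--         return "close"
--     elif ranged_count > melee_count:
--         return "long"
--     else:
--         return "medium"
-- ===== SOURCE B (Python) =====
-- def _determine_combat_distance(weapon_preferences, primary_role):
--     """Stack-based cancellation: each melee/ranged weapon pushes a tag,
--     and opposite tags on top of the stack cancel in pairs; the surviving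
--     tag (if any) decides the classification."""
--     stack = []
--     for weapon in weapon_preferences:
--         if weapon in ("unarmed", "melee", "lightsaber"):
--             tag = "M"
--         elif weapon in ("rifle", "carbine", "pistol", "heavy_weapon"):
--             tag = "R"
--         else:
--             continue
--         if stack and stack[-1] != tag:
--             stack.pop()
--         else:
--             stack.append(tag)
--     if not stack:
--         return "medium"
--     return "close" if stack[-1] == "M" else "long"
-- ===== Notes on version B (the rewrite author's own statement) =====
-- stated objective: alternative
-- what changed: Replaces the empty-list guard plus two membership-count passes and a count comparison with a stack-based cancellation pass: each melee/ranged weapon pushes a tag, opposite tags cancel in pairs, and the surviving tag (or an empty stack) decides the class.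
import Mathlib
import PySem

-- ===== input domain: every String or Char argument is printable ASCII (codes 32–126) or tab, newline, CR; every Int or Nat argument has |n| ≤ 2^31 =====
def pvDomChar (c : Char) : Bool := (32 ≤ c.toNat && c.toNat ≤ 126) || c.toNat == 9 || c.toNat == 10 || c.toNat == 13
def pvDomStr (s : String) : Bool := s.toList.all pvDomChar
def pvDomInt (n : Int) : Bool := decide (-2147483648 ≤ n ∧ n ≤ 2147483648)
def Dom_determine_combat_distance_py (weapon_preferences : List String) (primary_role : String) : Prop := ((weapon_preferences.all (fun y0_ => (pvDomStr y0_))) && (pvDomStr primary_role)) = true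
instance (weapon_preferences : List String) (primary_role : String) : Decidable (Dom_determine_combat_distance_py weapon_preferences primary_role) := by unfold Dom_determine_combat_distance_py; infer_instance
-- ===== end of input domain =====

-- B replaces A's empty-list guard plus two membership-count passes by a stack-based
-- cancellation pass (push a tag per melee/ranged weapon, opposite tags cancel),
-- classifying from the surviving tag (alternative algorithm, same cost).

-- ===== PORT A =====
-- literal port of A: empty guard, two membership-count passes, compare counts
def determine_combat_distance_py (weapon_preferences : List String) (primary_role : String) : String :=
  if weapon_preferences = [] then "medium"
  else
    let melee_weapons : List String := ["unarmed", "melee", "lightsaber"]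
    let ranged_weapons : List String := ["rifle", "carbine", "pistol", "heavy_weapon"]
    let melee_count : Int := weapon_preferences.foldl
      (fun acc w => if w ∈ melee_weapons then acc + 1 else acc) 0
    let ranged_count : Int := weapon_preferences.foldl
      (fun acc w => if w ∈ ranged_weapons then acc + 1 else acc) 0
    if melee_count > ranged_count then "close"
    else if ranged_count > melee_count then "long"
    else "medium"

-- ===== PORT B =====
-- one loop body of Source B; the stack's TOP is the list HEAD (cons = append, tail = pop)
def pvStackStep (stack : List String) (weapon : String) : List String :=
  if weapon ∈ (["unarmed", "melee", "lightsaber"] : List String) then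
    pvPushCancel stack "M"
  else if weapon ∈ (["rifle", "carbine", "pistol", "heavy_weapon"] : List String) then
    pvPushCancel stack "R"
  else stack
where
  pvPushCancel (stack : List String) (tag : String) : List String :=
    match stack with
    | top :: rest => if top ≠ tag then rest else tag :: top :: rest
    | [] => [tag]

def determine_combat_distance_py_alt (weapon_preferences : List String) (primary_role : String) : String :=
  let stack := weapon_preferences.foldl pvStackStep []
  match stack with
  | [] => "medium"
  | top :: _ => if top = "M" then "close" else "long"

-- ===== PRECONDITION & SPEC =====
def Spec_determine_combat_distance_py (weapon_preferences : List String) (primary_role : String) (out : String) : Prop := out = determine_combat_distance_py_alt weapon_preferences primary_role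
instance (weapon_preferences : List String) (primary_role : String) (out : String) : Decidable (Spec_determine_combat_distance_py weapon_preferences primary_role out) := by unfold Spec_determine_combat_distance_py; infer_instance

-- ===== CLAIM (what is proved, stated in full; the proofs are below) =====
def Claim_equal_determine_combat_distance_py : Prop := ∀ (weapon_preferences : List String) (primary_role : String), Dom_determine_combat_distance_py weapon_preferences primary_role → Spec_determine_combat_distance_py weapon_preferences primary_role (determine_combat_distance_py weapon_preferences primary_role)

-- ===== LEMMAS AND PROOFS =====

-- canonical stack for a signed melee/ranged balance d
def pvCanon (d : Int) : List String :=
  if 0 ≤ d then List.replicate d.toNat "M" else List.replicate (-d).toNat "R"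

-- signed weight of one weapon: melee indicator minus ranged indicator
def pvWeight (w : String) : Int :=
  (if w ∈ (["unarmed", "melee", "lightsaber"] : List String) then (1:Int) else 0) -
  (if w ∈ (["rifle", "carbine", "pistol", "heavy_weapon"] : List String) then (1:Int) else 0)

theorem pv_pushM (d : Int) :
    pvStackStep.pvPushCancel (pvCanon d) "M" = pvCanon (d + 1) := by
  unfold pvCanon
  rcases lt_trichotomy d 0 with h | h | h
  · rw [if_neg (by omega : ¬ (0:Int) ≤ d),
      (by omega : (-d).toNat = ((-d).toNat - 1) + 1), List.replicate_succ]
    simp only [pvStackStep.pvPushCancel, if_pos (by decide : ("R":String) ≠ "M")]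
    rcases eq_or_lt_of_le (by omega : d + 1 ≤ 0) with h1 | h1
    · rw [if_pos (by omega : (0:Int) ≤ d + 1)]
      have e1 : (-d).toNat - 1 = 0 := by omega
      have e2 : (d+1).toNat = 0 := by omega
      rw [e1, e2]; rfl
    · rw [if_neg (by omega : ¬ (0:Int) ≤ d + 1)]
      congr 1; omega
  · subst h; simp [pvStackStep.pvPushCancel]
  · rw [if_pos (le_of_lt h), (by omega : d.toNat = (d.toNat - 1) + 1), List.replicate_succ]
    simp only [pvStackStep.pvPushCancel, if_neg (by decide : ¬ ("M":String) ≠ "M")]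
    rw [if_pos (by omega : (0:Int) ≤ d + 1)]
    rw [(by omega : (d+1).toNat = ((d.toNat - 1) + 1) + 1), List.replicate_succ,
      List.replicate_succ]

theorem pv_pushR (d : Int) :
    pvStackStep.pvPushCancel (pvCanon d) "R" = pvCanon (d - 1) := by
  unfold pvCanon
  rcases lt_trichotomy d 0 with h | h | h
  · rw [if_neg (by omega : ¬ (0:Int) ≤ d),
      (by omega : (-d).toNat = ((-d).toNat - 1) + 1), List.replicate_succ]
    simp only [pvStackStep.pvPushCancel, if_neg (by decide : ¬ ("R":String) ≠ "R")]
    rw [if_neg (by omega : ¬ (0:Int) ≤ d - 1)]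
    rw [(by omega : (-(d-1)).toNat = (((-d).toNat - 1) + 1) + 1), List.replicate_succ,
      List.replicate_succ]
  · subst h; simp [pvStackStep.pvPushCancel]
  · rw [if_pos (le_of_lt h), (by omega : d.toNat = (d.toNat - 1) + 1), List.replicate_succ]
    simp only [pvStackStep.pvPushCancel, if_pos (by decide : ("M":String) ≠ "R")]
    rcases eq_or_lt_of_le (by omega : 0 ≤ d - 1) with h1 | h1
    · rw [if_pos (by omega : (0:Int) ≤ d - 1)]
      have e1 : d.toNat - 1 = 0 := by omega
      have e2 : (d-1).toNat = 0 := by omega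
      rw [e1, e2]
    · rw [if_pos (by omega : (0:Int) ≤ d - 1)]
      congr 1; omega

theorem pv_step_canon (d : Int) (w : String) :
    pvStackStep (pvCanon d) w = pvCanon (d + pvWeight w) := by
  unfold pvStackStep pvWeight
  by_cases hm : w ∈ (["unarmed", "melee", "lightsaber"] : List String) <;>
  by_cases hr : w ∈ (["rifle", "carbine", "pistol", "heavy_weapon"] : List String)
  · exfalso
    simp only [List.mem_cons, List.not_mem_nil, or_false] at hm hr
    rcases hm with h | h | h <;> rcases hr with h2 | h2 | h2 | h2 <;> simp_all
  · rw [if_pos hm, if_pos hm, if_neg hr, pv_pushM]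
    norm_num
  · rw [if_neg hm, if_pos hr, if_neg hm, if_pos hr, pv_pushR]
    ring_nf
  · rw [if_neg hm, if_neg hr, if_neg hm, if_neg hr]
    ring_nf

-- the whole fold keeps the stack canonical for the running balance
theorem pv_fold_canon (wp : List String) : ∀ (d : Int),
    wp.foldl pvStackStep (pvCanon d) =
      pvCanon (wp.foldl (fun acc w => acc + pvWeight w) d) := by
  induction wp with
  | nil => intro d; rfl
  | cons w rest ih => intro d; simp only [List.foldl_cons, pv_step_canon, ih]

-- the signed balance equals the difference of the two count folds, for any accumulators
theorem pv_balance_eq (wp : List String) : ∀ (a b : Int),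
    wp.foldl (fun acc w => acc + pvWeight w) (a - b) =
      wp.foldl (fun acc w => if w ∈ (["unarmed", "melee", "lightsaber"] : List String)
                             then acc + 1 else acc) a -
      wp.foldl (fun acc w => if w ∈ (["rifle", "carbine", "pistol", "heavy_weapon"] : List String)
                             then acc + 1 else acc) b := by
  induction wp with
  | nil => intro a b; simp
  | cons w rest ih =>
    intro a b
    simp only [List.foldl_cons]
    have : a - b + pvWeight w =
        (if w ∈ (["unarmed", "melee", "lightsaber"] : List String) then a + 1 else a) -
        (if w ∈ (["rifle", "carbine", "pistol", "heavy_weapon"] : List String) then b + 1 else b) := by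
      unfold pvWeight; split_ifs <;> ring
    rw [this, ih]

-- ===== VERDICT (by name: the statement is the Claim_ definition above) =====
theorem determine_combat_distance_py_spec : Claim_equal_determine_combat_distance_py := by
  intro wp pr _
  show determine_combat_distance_py wp pr = determine_combat_distance_py_alt wp pr
  unfold determine_combat_distance_py determine_combat_distance_py_alt
  have hc : wp.foldl pvStackStep [] =
      pvCanon (wp.foldl (fun acc w => acc + pvWeight w) 0) := by
    have := pv_fold_canon wp 0
    simpa [pvCanon] using this
  have hb := pv_balance_eq wp 0 0
  simp only [sub_zero] at hb
  rw [hc, hb]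
  set m := wp.foldl (fun acc x => if x ∈ (["unarmed", "melee", "lightsaber"] : List String) then acc + 1 else acc) (0:Int) with hm
  set r := wp.foldl (fun acc x => if x ∈ (["rifle", "carbine", "pistol", "heavy_weapon"] : List String) then acc + 1 else acc) (0:Int) with hr
  rcases eq_or_ne wp [] with h | h
  · subst h; simp [hm, hr, pvCanon]
  · simp only [h, if_false]
    unfold pvCanon
    rcases lt_trichotomy (m - r) 0 with hmr | hmr | hmr
    · have h1 : ¬ 0 ≤ m - r := by omega
      have h2 : (-(m - r)).toNat = ((-(m - r)).toNat - 1) + 1 := by omega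
      rw [if_neg h1, h2, List.replicate_succ]
      have : ¬ m > r := by omega
      have : ¬ (m > r) ∧ r > m := ⟨this, by omega⟩
      simp only [gt_iff_lt]
      rw [if_neg (by omega : ¬ r < m), if_pos (by omega : m < r)]
      simp
    · rw [if_pos (by omega : (0:Int) ≤ m - r)]
      have : (m - r).toNat = 0 := by omega
      rw [this, List.replicate_zero]
      rw [if_neg (by omega : ¬ r < m), if_neg (by omega : ¬ m < r)]
    · rw [if_pos (by omega : (0:Int) ≤ m - r)]
      have h2 : (m - r).toNat = ((m - r).toNat - 1) + 1 := by omega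
      rw [h2, List.replicate_succ]
      rw [if_pos (by omega : r < m)]
      simp
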